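-- pv_equiv track=rewrite | github.com/tsuiwwwayne/wikihow-data | clean.py | decouple_sentences
-- ===== SOURCE A (Python) =====
-- def decouple_sentences(string):
--     l = []
--     i = 0
--     end_punc = {'.', '?', '!'}
--     while i < len(string):
--         c = string[i]
--         prev_c = None if i == 0 else string[i-1]
--         if c.isalpha() and c.isupper() and prev_c in end_punc:
--             l.append(' ')
--         l.append(c)
--         i += 1
--     return ''.join(l)
-- ===== SOURCE B (Python) =====
-- def decouple_sentences(string):
--     # Stage 1: collect the boundary positions where a space must be inserted.
--     n = len(string)
--     cuts = [i for i in range(1, n)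
--             if string[i-1] in '.?!' and string[i].isalpha() and string[i].isupper()]
--     # Stage 2: slice the string at those positions and join the pieces with spaces.
--     parts = [string[a:b] for a, b in zip([0] + cuts, cuts + [n])]
--     return ' '.join(parts)
-- ===== Notes on version B (the rewrite author's own statement) =====
-- stated objective: faster
-- what changed: Replaced A's single pass that appends characters one by one with a two-stage approach: first compute the list of boundary indices, then slice the string at those indices and join the slices with spaces.
import Mathlib
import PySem

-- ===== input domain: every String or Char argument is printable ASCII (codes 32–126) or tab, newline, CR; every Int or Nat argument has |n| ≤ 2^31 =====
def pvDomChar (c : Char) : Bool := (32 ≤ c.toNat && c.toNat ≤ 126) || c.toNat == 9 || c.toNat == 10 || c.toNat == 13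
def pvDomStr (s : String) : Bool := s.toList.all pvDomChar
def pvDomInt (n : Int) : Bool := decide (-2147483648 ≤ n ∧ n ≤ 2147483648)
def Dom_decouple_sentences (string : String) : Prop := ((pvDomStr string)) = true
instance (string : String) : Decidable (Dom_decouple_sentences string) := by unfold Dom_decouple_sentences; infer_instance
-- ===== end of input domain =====

-- B replaces A's per-character emitting pass by two stages — collect boundary indices, then slice and join — measured faster by a constant factor (bulk slices instead of per-char appends).

-- ===== PORT A =====
def pvA_loop (s : List Char) (i : Nat) (l : List Char) : List Char :=
  if h : i < s.length then
    let c := s.getD i ' '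
    let cond := c.isAlpha && c.isUpper &&
      (if i = 0 then false
       else (let p := s.getD (i-1) ' '; p == '.' || p == '?' || p == '!'))
    pvA_loop s (i+1) (l ++ (if cond then [' ', c] else [c]))
  else l
termination_by s.length - i

def decouple_sentences (string : String) : String :=
  String.mk (pvA_loop string.toList 0 [])

-- ===== PORT B =====
-- string[i-1] in '.?!' and string[i].isalpha() and string[i].isupper()
def pvIsCut (s : List Char) (i : Nat) : Bool :=
  (s.getD (i-1) ' ' == '.' || s.getD (i-1) ' ' == '?' || s.getD (i-1) ' ' == '!')
    && (s.getD i ' ').isAlpha && (s.getD i ' ').isUpper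

-- string[a:b] for 0 ≤ a ≤ b ≤ len (exact for these in-range slices)
def pvSlice (s : List Char) (a b : Nat) : List Char := (s.drop a).take (b - a)

-- ' '.join(parts)
def pvJoin : List (List Char) → List Char
  | [] => []
  | [x] => x
  | x :: y :: rest => x ++ ' ' :: pvJoin (y :: rest)

def decouple_sentences_alt (string : String) : String :=
  let s := string.toList
  let n := s.length
  let cuts := (List.range' 1 (n - 1)).filter (pvIsCut s)
  let parts := ((0 :: cuts).zip (cuts ++ [n])).map fun ab => pvSlice s ab.1 ab.2
  String.mk (pvJoin parts)

-- ===== PRECONDITION & SPEC =====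
def Spec_decouple_sentences (string : String) (out : String) : Prop := out = decouple_sentences_alt string
instance (string : String) (out : String) : Decidable (Spec_decouple_sentences string out) := by unfold Spec_decouple_sentences; infer_instance

-- ===== CLAIM (what is proved, stated in full; the proofs are below) =====
def Claim_equal_decouple_sentences : Prop := ∀ (string : String), Dom_decouple_sentences string → Spec_decouple_sentences string (decouple_sentences string)

-- ===== LEMMAS AND PROOFS =====

-- Index-based characterisation of A's emitted characters.
def pvEmitIdx (s : List Char) (a : Nat) : List Char :=
  if h : a < s.length then
    (if 0 < a ∧ pvIsCut s a = true then ' ' :: [s.getD a ' '] else [s.getD a ' ']) ++ pvEmitIdx s (a+1)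
  else []
termination_by s.length - a

theorem pvA_loop_eq (s : List Char) (i : Nat) (l : List Char) :
    pvA_loop s i l = l ++ pvEmitIdx s i := by
  by_cases h : i < s.length
  · rw [pvA_loop, pvEmitIdx]
    simp only [h, dif_pos]
    rw [pvA_loop_eq s (i+1)]
    rcases Nat.eq_zero_or_pos i with hi | hi
    · subst hi; simp [pvIsCut]
    · have hne : i ≠ 0 := Nat.pos_iff_ne_zero.mp hi
      rw [if_neg hne]
      simp only [hi, true_and, pvIsCut, Bool.and_eq_true, Bool.or_eq_true, beq_iff_eq]
      have hcond : (((s.getD i ' ').isAlpha = true ∧ (s.getD i ' ').isUpper = true) ∧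
          ((s.getD (i-1) ' ' = '.' ∨ s.getD (i-1) ' ' = '?') ∨ s.getD (i-1) ' ' = '!')) ↔
          ((((s.getD (i-1) ' ' = '.' ∨ s.getD (i-1) ' ' = '?') ∨ s.getD (i-1) ' ' = '!') ∧
            (s.getD i ' ').isAlpha = true) ∧ (s.getD i ' ').isUpper = true) := by tauto
      simp only [hcond, List.append_assoc]
  · rw [pvA_loop, pvEmitIdx]
    simp [h]
termination_by s.length - i

-- No boundary anywhere from a on: A emits the plain suffix.
theorem pvEmitIdx_no_cut (s : List Char) (a : Nat)
    (h : ∀ j, a ≤ j → j < s.length → ¬(0 < j ∧ pvIsCut s j = true)) :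
    pvEmitIdx s a = s.drop a := by
  rw [pvEmitIdx]
  by_cases ha : a < s.length
  · simp only [ha, dif_pos]
    rw [if_neg (h a le_rfl ha)]
    rw [pvEmitIdx_no_cut s (a+1) (fun j hj => h j (Nat.le_of_succ_le hj))]
    rw [List.drop_eq_getElem_cons ha, List.getD_eq_getElem s ' ' ha]
    rfl
  · simp [ha, List.drop_eq_nil_of_le (Nat.le_of_not_lt ha)]
termination_by s.length - a

theorem pvSlice_cons (s : List Char) (a b : Nat) (ha : a < s.length) (hab : a < b) :
    pvSlice s a b = s.getD a ' ' :: pvSlice s (a+1) b := by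
  unfold pvSlice
  rw [List.drop_eq_getElem_cons ha]
  have h1 : b - a = (b - (a+1)) + 1 := by omega
  rw [h1, List.take_succ_cons, List.getD_eq_getElem s ' ' ha]

theorem pvSlice_one (s : List Char) (a : Nat) (ha : a < s.length) :
    pvSlice s a (a+1) = [s.getD a ' '] := by
  unfold pvSlice
  rw [List.drop_eq_getElem_cons ha]
  have h1 : a + 1 - a = 0 + 1 := by omega
  rw [h1, List.take_succ_cons, List.take_zero, List.getD_eq_getElem s ' ' ha]

-- From position a (exclusive) to the next boundary b: plain slice, then the inserted space.
theorem pvEmit_to_cut (s : List Char) (a b : Nat) (hab : a < b) (hb : b < s.length)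
    (hcut : pvIsCut s b = true) (hno : ∀ j, a < j → j < b → pvIsCut s j = false) :
    s.getD a ' ' :: pvEmitIdx s (a+1) =
      pvSlice s a b ++ ' ' :: s.getD b ' ' :: pvEmitIdx s (b+1) := by
  rcases Nat.lt_or_ge (a+1) b with h1 | h1
  · have ha1 : a + 1 < s.length := by omega
    rw [pvEmitIdx]
    simp only [ha1, dif_pos]
    rw [if_neg (by
      rintro ⟨-, hc⟩
      rw [hno (a+1) (by omega) h1] at hc
      exact absurd hc (by simp))]
    rw [pvSlice_cons s a b (by omega) hab]
    have hrec := pvEmit_to_cut s (a+1) b h1 hb hcut (fun j hj => hno j (by omega))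
    simp only [List.singleton_append, List.cons_append, List.nil_append]
    rw [hrec]
  · have hb1 : b = a + 1 := by omega
    subst hb1
    rw [pvEmitIdx]
    simp only [hb, dif_pos]
    rw [if_pos ⟨by omega, hcut⟩]
    rw [pvSlice_one s a (by omega)]
    rfl
termination_by b - a

theorem pvJoin_cons (f : Nat × Nat → List Char) (x : List Char) (ps : List (Nat × Nat))
    (h : ps ≠ []) :
    pvJoin (x :: ps.map f) = x ++ ' ' :: pvJoin (ps.map f) := by
  cases ps with
  | nil => exact absurd rfl h
  | cons p ps => rfl

-- Decomposing a filtered range at its head.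
theorem pvFilter_range'_cons (P : Nat → Bool) (lo len : Nat) (b : Nat) (rest : List Nat)
    (h : (List.range' lo len).filter P = b :: rest) :
    lo ≤ b ∧ b < lo + len ∧ P b = true ∧ (∀ i, lo ≤ i → i < b → P i = false) ∧
      rest = (List.range' (b+1) (lo + len - (b+1))).filter P := by
  induction len generalizing lo with
  | zero => simp at h
  | succ m ih =>
      rw [List.range'_succ] at h
      by_cases hP : P lo
      · rw [List.filter_cons_of_pos hP] at h
        obtain ⟨hb, hr⟩ := List.cons.inj h
        subst hb
        refine ⟨le_rfl, by omega, hP, fun i hi1 hi2 => absurd (lt_of_lt_of_le hi2 hi1) (lt_irrefl i), ?_⟩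
        have harith : lo + (m+1) - (lo+1) = m := by omega
        rw [harith, hr]
      · rw [List.filter_cons_of_neg hP] at h
        obtain ⟨h1, h2, h3, h4, h5⟩ := ih (lo+1) h
        refine ⟨by omega, by omega, h3, ?_, ?_⟩
        · intro i hi1 hi2
          rcases Nat.eq_or_lt_of_le hi1 with he | hl
          · subst he; simpa using hP
          · exact h4 i hl hi2
        · have harith : lo + (m+1) - (b+1) = lo + 1 + m - (b+1) := by omega
          rw [harith, h5]

theorem pvFilter_range'_nil (P : Nat → Bool) (lo len : Nat)
    (h : (List.range' lo len).filter P = []) :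
    ∀ i, lo ≤ i → i < lo + len → P i = false := by
  intro i h1 h2
  by_contra hc
  have hm : i ∈ (List.range' lo len).filter P := by
    rw [List.mem_filter]
    refine ⟨?_, by simpa using hc⟩
    rw [List.mem_range']
    exact ⟨i - lo, by omega, by omega⟩
  rw [h] at hm
  simp at hm

-- Main invariant: joining the slices from position a equals A's emission from a.
theorem pvJoin_parts (s : List Char) (k a : Nat) (hk : s.length - a = k) (ha : a < s.length) :
    pvJoin (((a :: (List.range' (a+1) (s.length - (a+1))).filter (pvIsCut s)).zip
        (((List.range' (a+1) (s.length - (a+1))).filter (pvIsCut s)) ++ [s.length])).map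
          fun ab => pvSlice s ab.1 ab.2)
      = s.getD a ' ' :: pvEmitIdx s (a+1) := by
  induction k using Nat.strong_induction_on generalizing a with
  | _ k ih =>
  subst hk
  cases h : (List.range' (a+1) (s.length - (a+1))).filter (pvIsCut s) with
  | nil =>
      simp only [h, List.nil_append, List.zip_cons_cons, List.zip_nil_left, List.map, pvJoin]
      have hno := pvFilter_range'_nil (pvIsCut s) (a+1) (s.length - (a+1)) h
      have hE : pvEmitIdx s (a+1) = s.drop (a+1) := by
        apply pvEmitIdx_no_cut
        rintro j hj1 hj2 ⟨-, hc⟩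
        rw [hno j hj1 (by omega)] at hc
        exact absurd hc (by simp)
      rw [hE]
      unfold pvSlice
      have hsa : s.length - a = (s.length - (a+1)) + 1 := by omega
      rw [List.drop_eq_getElem_cons ha, hsa, List.take_succ_cons,
        List.take_of_length_le (by simp), List.getD_eq_getElem s ' ' ha]
  | cons b rest =>
      obtain ⟨hb1, hb2, hbc, hno, hrest⟩ := pvFilter_range'_cons (pvIsCut s) (a+1) (s.length - (a+1)) b rest h
      have hbn : b < s.length := by omega
      have hrest' : rest = (List.range' (b+1) (s.length - (b+1))).filter (pvIsCut s) := by
        rw [hrest]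
        have harith : a + 1 + (s.length - (a+1)) - (b+1) = s.length - (b+1) := by omega
        rw [harith]
      have hIH := ih (s.length - b) (by omega) b rfl hbn
      rw [← hrest'] at hIH
      simp only [List.cons_append, List.zip_cons_cons, List.map_cons]
      have hne2 : ((b :: rest).zip (rest ++ [s.length])) ≠ [] := by
        apply List.ne_nil_of_length_pos
        simp
      rw [pvJoin_cons _ _ _ hne2, hIH]
      exact (pvEmit_to_cut s a b (by omega) hbn hbc
        (fun j hj1 hj2 => hno j (by omega) hj2)).symm

-- ===== VERDICT (by name: the statement is the Claim_ definition above) =====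
theorem decouple_sentences_spec : Claim_equal_decouple_sentences := by
  intro string _
  unfold Spec_decouple_sentences decouple_sentences decouple_sentences_alt
  rw [pvA_loop_eq]
  simp only [List.nil_append]
  by_cases hlen : 0 < string.toList.length
  · have hmain := pvJoin_parts string.toList (string.toList.length - 0) 0 rfl hlen
    simp only [Nat.zero_add] at hmain
    rw [hmain]
    conv_lhs => rw [pvEmitIdx]
    rw [dif_pos hlen, if_neg (by simp)]
    rfl
  · have hnil : string.toList = [] := List.eq_nil_of_length_eq_zero (by omega)
    rw [hnil]
    simp [pvEmitIdx, pvJoin, pvSlice]
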